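-- pv_equiv track=rewrite | github.com/adityapgupta/Numerical_Methods | Problem_Set_3/Q1(forward).py | delta_values
-- ===== SOURCE A (Python) =====
-- def delta_values(A):
--     values = []
--     values.append(A)
--
--     for i in range(len(A)-1):
--         temp = []
--         for j in range(len(A)-i-1):
--             value = values[i][j+1]-values[i][j]
--             temp.append(value)
--         values.append(temp)
--
--     firsts = [x[0] for x in values]
--     return firsts
-- ===== SOURCE B (Python) =====
-- # Closed form: the i-th entry is the binomial-weighted alternating sum of the original values.
-- from math import comb
--
-- def delta_values(A):
--     return [sum((-1) ** (i - k) * comb(i, k) * A[k] for k in range(i + 1))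
--             for i in range(len(A))]
-- ===== Notes on version B (the rewrite author's own statement) =====
-- stated objective: alternative
-- what changed: Replaces the row-by-row construction of the whole forward-difference table by the closed-form Newton formula: entry i is the alternating binomial sum sum_k (-1)^(i-k)*C(i,k)*A[k], computed directly with math.comb, with no difference rows at all.
-- outside the precondition, e.g. on delta_values([]): A raises IndexError, B returns []
import Mathlib
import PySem

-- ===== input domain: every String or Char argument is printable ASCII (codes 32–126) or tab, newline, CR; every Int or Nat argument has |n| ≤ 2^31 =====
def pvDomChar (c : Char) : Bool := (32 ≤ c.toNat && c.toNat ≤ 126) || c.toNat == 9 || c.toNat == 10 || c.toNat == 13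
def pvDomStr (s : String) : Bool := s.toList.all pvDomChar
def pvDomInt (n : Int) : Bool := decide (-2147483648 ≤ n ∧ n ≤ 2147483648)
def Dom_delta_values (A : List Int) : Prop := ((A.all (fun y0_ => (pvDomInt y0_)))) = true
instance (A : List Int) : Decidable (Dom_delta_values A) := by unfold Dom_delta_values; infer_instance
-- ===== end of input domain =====

-- B replaces A's iterative difference table by the closed-form Newton formula (alternative; same return value — A mutates nothing).

-- ===== PORT A =====
-- literal transliteration of A: build the full table row by row via indexed loops, then extract the first column
def delta_values (A : List Int) : List Int :=
  let values : List (List Int) := [A]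
  let values := (PySem.List.pyRange 0 ((A.length : Int) - 1) 1).foldl (fun values i =>
    let temp := (PySem.List.pyRange 0 ((A.length : Int) - i - 1) 1).foldl
      (fun temp j => temp ++ [PySem.List.pyGetD (PySem.List.pyGetD values i []) (j + 1) 0
                              - PySem.List.pyGetD (PySem.List.pyGetD values i []) j 0]) []
    values ++ [temp]) values
  values.map (fun x => PySem.List.pyGetD x 0 0)

-- ===== PORT B =====
-- [sum((-1)**(i-k) * comb(i, k) * A[k] for k in range(i+1)) for i in range(len(A))]
def delta_values_alt (A : List Int) : List Int :=
  (List.range A.length).map (fun i =>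
    ((List.range (i + 1)).map
      (fun k => (-1 : Int) ^ (i - k) * (Nat.choose i k : Int) * PySem.List.pyGetD A (k : Int) 0)).sum)

-- ===== PRECONDITION & SPEC =====
-- Pre_ excludes only the empty list, on which A raises IndexError while extracting the first column (B returns [] there).
def Pre_delta_values (A : List Int) : Prop := A ≠ []
instance (A : List Int) : Decidable (Pre_delta_values A) := by unfold Pre_delta_values; infer_instance
def pvWitness_delta_values : List Int := [3, 1, 4]

def Spec_delta_values (A : List Int) (out : List Int) : Prop := out = delta_values_alt A
instance (A : List Int) (out : List Int) : Decidable (Spec_delta_values A out) := by unfold Spec_delta_values; infer_instance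

-- ===== CLAIM (what is proved, stated in full; the proofs are below) =====
def Claim_equal_delta_values : Prop := ∀ (A : List Int), Dom_delta_values A → Pre_delta_values A → Spec_delta_values A (delta_values A)

-- ===== LEMMAS AND PROOFS =====

-- pairwise-difference row, the mathematical object both ports are related to
def pvDiff (xs : List Int) : List Int := (xs.zip (xs.drop 1)).map (fun p => p.2 - p.1)

theorem pvDiff_length (xs : List Int) : (pvDiff xs).length = xs.length - 1 := by
  simp [pvDiff]

-- the inner loop of A builds exactly the pairwise-difference list of its row
theorem inner_loop_eq (xs : List Int) :
    (PySem.List.pyRange 0 ((xs.length : Int) - 1) 1).foldl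
      (fun temp j => temp ++ [PySem.List.pyGetD xs (j + 1) 0 - PySem.List.pyGetD xs j 0]) []
    = pvDiff xs := by
  rw [PySem.List.foldl_append_singleton_eq_map, PySem.List.pyRange_one]
  simp only [List.nil_append, List.map_map]
  apply List.ext_getElem
  · simp [pvDiff]
  · intro k h1 h2
    have hk : k + 1 < xs.length := by
      simp at h1; omega
    simp only [List.getElem_map, List.getElem_range, Function.comp]
    have e0 : (0 : Int) + (k : Int) = ((k : Nat) : Int) := zero_add _
    have e1 : (0 : Int) + (k : Int) + 1 = ((k + 1 : Nat) : Int) := by push_cast; ring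
    rw [e1, e0, PySem.List.pyGetD_natCast, PySem.List.pyGetD_natCast,
        List.getD_eq_getElem _ _ hk, List.getD_eq_getElem _ _ (by omega)]
    simp [pvDiff]

theorem iterate_pvDiff_length (A : List Int) (i : Nat) :
    (pvDiff^[i] A).length = A.length - i := by
  induction i with
  | zero => simp
  | succ i ih => rw [Function.iterate_succ_apply', pvDiff_length, ih]; omega

-- the outer loop invariant: after m steps the table is the first m+1 iterated-difference rows
theorem outer_loop_eq (A : List Int) (m : Nat) (hm : m ≤ A.length - 1) :
    (PySem.List.pyRange 0 (m : Int) 1).foldl (fun values i =>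
      let temp := (PySem.List.pyRange 0 ((A.length : Int) - i - 1) 1).foldl
        (fun temp j => temp ++ [PySem.List.pyGetD (PySem.List.pyGetD values i []) (j + 1) 0
                                - PySem.List.pyGetD (PySem.List.pyGetD values i []) j 0]) []
      values ++ [temp]) [A]
    = (List.range (m + 1)).map (fun i => pvDiff^[i] A) := by
  induction m with
  | zero => simp [PySem.List.pyRange_one_eq_nil]
  | succ m ih =>
    have hm' : m ≤ A.length - 1 := by omega
    have hcast : ((m + 1 : Nat) : Int) = (m : Int) + 1 := by omega
    rw [hcast, PySem.List.pyRange_one_succ_right (Int.natCast_nonneg m), List.foldl_append, ih hm']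
    simp only [List.foldl_cons, List.foldl_nil]
    have hrow : PySem.List.pyGetD ((List.range (m + 1)).map (fun i => pvDiff^[i] A)) (m : Int) []
        = pvDiff^[m] A := by
      rw [PySem.List.pyGetD_natCast, List.getD_eq_getElem _ _ (by simp), List.getElem_map,
          List.getElem_range]
    have hbound : (A.length : Int) - (m : Int) - 1 = (((pvDiff^[m] A).length : Int)) - 1 := by
      rw [iterate_pvDiff_length]; omega
    rw [hrow, hbound, inner_loop_eq]
    rw [List.range_succ (n := m + 1), List.map_append]
    simp [Function.iterate_succ_apply']

-- A's port, on a nonempty list, is the first column of the iterated-difference rows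
theorem delta_values_eq (A : List Int) (h : A ≠ []) :
    delta_values A = (List.range A.length).map (fun i => (pvDiff^[i] A).getD 0 0) := by
  have hn : 1 ≤ A.length := List.length_pos_of_ne_nil h
  show ((PySem.List.pyRange 0 ((A.length : Int) - 1) 1).foldl _ [A]).map _ = _
  have hcast : ((A.length : Int) - 1) = ((A.length - 1 : Nat) : Int) := by omega
  rw [hcast, outer_loop_eq A (A.length - 1) le_rfl, Nat.sub_add_cancel hn, List.map_map]
  apply List.map_congr_left
  intro i _
  simp [PySem.List.pyGetD_zero]

-- Finset-range sums are List-range sums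
theorem finset_sum_eq_list_sum (n : Nat) (g : Nat → Int) :
    ∑ k ∈ Finset.range n, g k = ((List.range n).map g).sum := by
  induction n with
  | zero => simp
  | succ n ih =>
    rw [Finset.sum_range_succ, List.range_succ, List.map_append, List.sum_append, ih]; simp

-- one difference step, elementwise
theorem pvDiff_getD (xs : List Int) (j : Nat) (h : j + 1 < xs.length) :
    (pvDiff xs).getD j 0 = xs.getD (j + 1) 0 - xs.getD j 0 := by
  have hj : j < (pvDiff xs).length := by rw [pvDiff_length]; omega
  rw [List.getD_eq_getElem _ _ hj, List.getD_eq_getElem _ _ h, List.getD_eq_getElem _ _ (by omega)]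
  simp [pvDiff]

-- the iterated rows coincide with Mathlib's forward-difference operator on the index function
theorem iterate_pvDiff_getD (A : List Int) (i : Nat) : ∀ (j : Nat), i + j < A.length →
    (pvDiff^[i] A).getD j 0 = (fwdDiff 1 ·)^[i] (fun n : Nat => A.getD n 0) j := by
  induction i with
  | zero => intro j _; simp
  | succ i ih =>
    intro j hj
    rw [Function.iterate_succ_apply', Function.iterate_succ_apply',
        pvDiff_getD _ _ (by rw [iterate_pvDiff_length]; omega), fwdDiff]
    rw [ih (j + 1) (by omega), ih j (by omega)]

-- Newton's formula, instantiated: the head of the i-th row is B's alternating binomial sum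
theorem head_row_eq (A : List Int) (i : Nat) (hi : i < A.length) :
    (pvDiff^[i] A).getD 0 0
      = ((List.range (i + 1)).map
          (fun k => (-1 : Int) ^ (i - k) * (Nat.choose i k : Int) * PySem.List.pyGetD A (k : Int) 0)).sum := by
  rw [iterate_pvDiff_getD A i 0 (by omega),
      fwdDiff_iter_eq_sum_shift 1 (fun n : Nat => A.getD n 0) i 0]
  rw [← finset_sum_eq_list_sum]
  apply Finset.sum_congr rfl
  intro k _
  rw [PySem.List.pyGetD_natCast]
  simp [mul_assoc]

-- ===== VERDICT (by name: the statement is the Claim_ definition above) =====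
theorem delta_values_spec : Claim_equal_delta_values := by
  intro A _ hpre
  show delta_values A = delta_values_alt A
  rw [delta_values_eq A hpre]
  apply List.map_congr_left
  intro i hi
  exact head_row_eq A i (List.mem_range.mp hi)
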